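-- pv_equiv track=rewrite | github.com/kajenthavaraj/telegrambot | response_engine.py | remove_questions
-- ===== SOURCE A (Python) =====
-- def remove_questions(reply_array):
--     num_questions = 0
--
--     new_reply_array = []
--
--     for reply in reply_array:
--         if("?" in  reply):
--             if(num_questions < 1):
--                 new_reply_array.append(reply)
--
--             num_questions+=1
--         else:
--             new_reply_array.append(reply)
--
--     return new_reply_array
-- ===== SOURCE B (Python) =====
-- def remove_questions(reply_array):
--     first = next((i for i, r in enumerate(reply_array) if "?" in r), None)
--     return [r for i, r in enumerate(reply_array) if "?" not in r or i == first]
-- ===== Notes on version B (the rewrite author's own statement) =====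
-- stated objective: idiomatic
-- what changed: Replaces A's running-counter accumulator loop with a locate-then-filter decomposition: first compute the index of the earliest question, then keep each element iff it is not a question or is that first question.
import Mathlib
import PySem

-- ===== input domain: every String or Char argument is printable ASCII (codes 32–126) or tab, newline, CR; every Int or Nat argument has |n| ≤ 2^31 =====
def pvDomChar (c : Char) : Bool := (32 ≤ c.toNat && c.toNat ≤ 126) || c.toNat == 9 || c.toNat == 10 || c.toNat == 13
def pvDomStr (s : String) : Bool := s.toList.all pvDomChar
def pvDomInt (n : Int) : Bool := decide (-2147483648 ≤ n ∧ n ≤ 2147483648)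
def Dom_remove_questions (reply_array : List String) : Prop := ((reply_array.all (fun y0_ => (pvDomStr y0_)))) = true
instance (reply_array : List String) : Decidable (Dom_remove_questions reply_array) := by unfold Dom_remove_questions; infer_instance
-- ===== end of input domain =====

-- B replaces A's running-counter single pass with a locate-first-question-then-filter decomposition (idiomatic; same cost).

-- ===== PORT A =====
-- the for-loop of A over (num_questions, new_reply_array)
def rqLoop (num_questions : Nat) (new_reply_array : List String) (xs : List String) : List String :=
  match xs with
  | [] => new_reply_array
  | reply :: rest =>
      if PySem.Str.isIn "?" reply then
        rqLoop (num_questions + 1)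
          (if num_questions < 1 then new_reply_array ++ [reply] else new_reply_array) rest
      else
        rqLoop num_questions (new_reply_array ++ [reply]) rest

def remove_questions (reply_array : List String) : List String :=
  rqLoop 0 [] reply_array

-- ===== PORT B =====
def remove_questions_alt (reply_array : List String) : List String :=
  let first : Option Int :=
    ((PySem.List.enumerate reply_array 0).find? (fun p => PySem.Str.isIn "?" p.2)).map (·.1)
  ((PySem.List.enumerate reply_array 0).filter
      (fun p => !PySem.Str.isIn "?" p.2 || some p.1 == first)).map (·.2)

-- ===== PRECONDITION & SPEC =====
def Spec_remove_questions (reply_array : List String) (out : List String) : Prop := out = remove_questions_alt reply_array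
instance (reply_array : List String) (out : List String) : Decidable (Spec_remove_questions reply_array out) := by unfold Spec_remove_questions; infer_instance

-- ===== CLAIM (what is proved, stated in full; the proofs are below) =====
def Claim_equal_remove_questions : Prop := ∀ (reply_array : List String), Dom_remove_questions reply_array → Spec_remove_questions reply_array (remove_questions reply_array)

-- ===== LEMMAS AND PROOFS =====

-- B's result generalized over the enumerate start index
def rqAltGen (s : Int) (xs : List String) : List String :=
  ((PySem.List.enumerate xs s).filter
      (fun p => !PySem.Str.isIn "?" p.2 ||
        some p.1 == ((PySem.List.enumerate xs s).find? (fun q => PySem.Str.isIn "?" q.2)).map (·.1))).map (·.2)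

-- once the counter is ≥ 1, A's loop just filters out questions
theorem rqLoop_ge_one (xs : List String) :
    ∀ (n : Nat) (acc : List String), 1 ≤ n →
      rqLoop n acc xs = acc ++ xs.filter (fun r => !PySem.Str.isIn "?" r) := by
  induction xs with
  | nil => intro n acc _; simp [rqLoop]
  | cons r rest ih =>
    intro n acc hn
    by_cases hq : PySem.Chars.isIn ['?'] r.toList = true
    · simp [rqLoop, PySem.Str.isIn, hq, show ¬ n < 1 by omega, ih (n+1) acc (by omega)]
    · simp only [Bool.not_eq_true] at hq
      simp [rqLoop, PySem.Str.isIn, hq, ih n (acc ++ [r]) hn]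

-- filtering enumerate on a predicate of the element only, then projecting, is filtering
theorem filter_enumerate_snd (f : String → Bool) (xs : List String) :
    ∀ s : Int, ((PySem.List.enumerate xs s).filter (fun p => f p.2)).map (·.2) = xs.filter f := by
  induction xs with
  | nil => intro s; simp [PySem.List.enumerate_nil]
  | cons r rest ih =>
    intro s
    by_cases hf : f r = true
    · simp [PySem.List.enumerate_cons, hf, ih (s+1)]
    · simp only [Bool.not_eq_true] at hf
      simp [PySem.List.enumerate_cons, hf, ih (s+1)]

-- indices occurring in enumerate xs (s+1) are never s
theorem idx_ne_of_mem (xs : List String) (s : Int) (p : Int × String)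
    (hp : p ∈ PySem.List.enumerate xs (s + 1)) : p.1 ≠ s := by
  rcases (PySem.List.mem_enumerate_iff xs (s+1) p).1 hp with ⟨k, hk, rfl⟩
  simp; omega

theorem rqLoop_eq_altGen (xs : List String) :
    ∀ (s : Int) (acc : List String), rqLoop 0 acc xs = acc ++ rqAltGen s xs := by
  induction xs with
  | nil => intro s acc; simp [rqLoop, rqAltGen, PySem.List.enumerate_nil]
  | cons r rest ih =>
    intro s acc
    by_cases hq : PySem.Chars.isIn ['?'] r.toList = true
    · -- first question found at index s; the rest is plain filtering on both sides
      have hrest :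
          ((PySem.List.enumerate rest (s+1)).filter
              (fun p => !PySem.Chars.isIn ['?'] p.2.toList || p.1 == s)).map (·.2)
            = rest.filter (fun x => !PySem.Chars.isIn ['?'] x.toList) := by
        rw [List.filter_congr (fun p hp => ?_), filter_enumerate_snd]
        have := idx_ne_of_mem rest s p hp
        simp [this]
      simp only [rqLoop, PySem.Str.isIn, if_pos (by omega : (0 : Nat) < 1)]
      rw [rqLoop_ge_one rest 1 (acc ++ [r]) le_rfl]
      simp [rqAltGen, PySem.List.enumerate_cons, PySem.Str.isIn, hq, hrest]
    · simp only [Bool.not_eq_true] at hq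
      have : rqAltGen s (r :: rest) = r :: rqAltGen (s+1) rest := by
        simp [rqAltGen, PySem.List.enumerate_cons, PySem.Str.isIn, hq]
      rw [this]
      rw [rqLoop, if_neg (by simp [PySem.Str.isIn, hq])]
      rw [ih (s+1) (acc ++ [r])]
      simp

-- ===== VERDICT (by name: the statement is the Claim_ definition above) =====
theorem remove_questions_spec : Claim_equal_remove_questions := by
  intro xs _
  unfold Spec_remove_questions remove_questions remove_questions_alt
  have h := rqLoop_eq_altGen xs 0 []
  simpa [rqAltGen] using h
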